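-- pv_equiv track=rewrite | github.com/Xiaohuaniu0032/HIVDrug | generateConsensus/gvcf_to_fasta_v3.py | is_hp_diff
-- ===== SOURCE A (Python) =====
-- def is_hp_diff(baseseq_0, baseseq_1):
--     """
--     Simple and effective (though not efficient) way to tell if the diff between two strings is just HP-INDEL
--     """
--     if len(baseseq_0) == len(baseseq_1):
--         return False
--     hp_compressed_list = [[], []]
--
--     for seq_idx, baseseq in enumerate([baseseq_0, baseseq_1]):
--         my_hp_compressed = hp_compressed_list[seq_idx]
--         prev_nuc = None
--         for nuc in baseseq:
--             if nuc == prev_nuc: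
--                 my_hp_compressed[-1][1] += 1
--             else:
--                 my_hp_compressed.append([nuc, 1])
--                 prev_nuc = nuc
--     if len(hp_compressed_list[0]) != len(hp_compressed_list[1]):
--         return False
--
--     num_nuc_diff = 0
--     for nuc_order_idx in range(len(hp_compressed_list[0])):
--         if hp_compressed_list[0][nuc_order_idx][0] != hp_compressed_list[1][nuc_order_idx][0]:
--             return False
--         if hp_compressed_list[0][nuc_order_idx][1] != hp_compressed_list[1][nuc_order_idx][1]:
--             num_nuc_diff += 1
--             if num_nuc_diff > 1:
--                 return False
--     return True
-- ===== SOURCE B (Python) =====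
-- def is_hp_diff(baseseq_0, baseseq_1):
--     """True iff the two strings differ only by a single homopolymer indel.
--     Single interleaved merge pass over both strings (no run-list materialisation)."""
--     if len(baseseq_0) == len(baseseq_1):
--         return False
--     s, t = baseseq_0, baseseq_1
--     i = j = 0
--     diffs = 0
--     while i < len(s) or j < len(t):
--         if i >= len(s) or j >= len(t):
--             return False
--         c = s[i]
--         if c != t[j]:
--             return False
--         i2 = i + 1
--         while i2 < len(s) and s[i2] == c:
--             i2 += 1
--         j2 = j + 1
--         while j2 < len(t) and t[j2] == c:
--             j2 += 1
--         if i2 - i != j2 - j: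
--             diffs += 1
--             if diffs > 1:
--                 return False
--         i, j = i2, j2
--     return True
-- ===== Notes on version B (the rewrite author's own statement) =====
-- stated objective: alternative
-- what changed: Replaces the two-pass run-list compression plus index-loop comparison with a single interleaved two-pointer merge pass that extracts and compares homopolymer runs on the fly, never materialising run lists.
import Mathlib
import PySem

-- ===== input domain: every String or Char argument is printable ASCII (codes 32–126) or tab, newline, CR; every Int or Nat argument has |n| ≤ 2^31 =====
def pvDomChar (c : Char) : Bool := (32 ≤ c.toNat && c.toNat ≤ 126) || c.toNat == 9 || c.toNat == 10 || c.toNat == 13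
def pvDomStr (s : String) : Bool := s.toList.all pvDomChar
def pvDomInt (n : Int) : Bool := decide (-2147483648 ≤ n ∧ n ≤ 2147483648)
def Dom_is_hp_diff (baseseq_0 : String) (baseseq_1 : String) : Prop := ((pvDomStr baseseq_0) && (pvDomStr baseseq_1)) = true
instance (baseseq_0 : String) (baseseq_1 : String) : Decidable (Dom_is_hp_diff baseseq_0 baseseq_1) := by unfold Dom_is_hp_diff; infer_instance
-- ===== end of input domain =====

-- B replaces A's two compression passes + comparison pass by one interleaved two-pointer
-- merge pass over both strings (objective: alternative; same asymptotic cost, no run lists).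

-- ===== PORT A =====
-- A: my_hp_compressed[-1][1] += 1 (in-place increment of the last run's count)
def pvUpdateLast : List (Char × Nat) → List (Char × Nat)
  | [] => []
  | [x] => [(x.1, x.2 + 1)]
  | x :: y :: ys => x :: pvUpdateLast (y :: ys)

-- A: the body of the inner `for nuc in baseseq` loop; state = (my_hp_compressed, prev_nuc)
def pvHpStep (st : List (Char × Nat) × Option Char) (nuc : Char) : List (Char × Nat) × Option Char :=
  if some nuc = st.2 then (pvUpdateLast st.1, st.2) else (st.1 ++ [(nuc, 1)], some nuc)

-- A: one string's hp compression (run lengths are Python ints, here nonnegative counts)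
def pvCompress (s : List Char) : List (Char × Nat) :=
  (s.foldl pvHpStep ([], none)).1

-- A: the final `for nuc_order_idx in range(...)` loop over the two equal-length run lists,
-- carrying num_nuc_diff
def pvCheckA : List (Char × Nat) → List (Char × Nat) → Nat → Bool
  | [], _, _ => true
  | _ :: _, [], _ => true
  | x :: xs, y :: ys, d =>
    if x.1 ≠ y.1 then false
    else if x.2 ≠ y.2 then
      (if d + 1 > 1 then false else pvCheckA xs ys (d + 1))
    else pvCheckA xs ys d

def is_hp_diff (baseseq_0 : String) (baseseq_1 : String) : Bool :=
  if baseseq_0.toList.length = baseseq_1.toList.length then false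
  else
    let c0 := pvCompress baseseq_0.toList
    let c1 := pvCompress baseseq_1.toList
    if c0.length ≠ c1.length then false
    else pvCheckA c0 c1 0

-- ===== PORT B =====
-- B: advance over the homopolymer run of c: (extra copies of c consumed, remainder)
def pvRunSplit (c : Char) : List Char → Nat × List Char
  | [] => (0, [])
  | x :: xs => if x = c then ((pvRunSplit c xs).1 + 1, (pvRunSplit c xs).2) else (0, x :: xs)

theorem pvRunSplit_len (c : Char) : ∀ xs : List Char, (pvRunSplit c xs).2.length ≤ xs.length
  | [] => le_refl _
  | x :: xs => by
    simp only [pvRunSplit]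
    split
    · exact le_trans (pvRunSplit_len c xs) (Nat.le_succ _)
    · exact le_refl _

-- B: the interleaved merge loop; d = diffs
def pvMergeB : List Char → List Char → Nat → Bool
  | [], [], _ => true
  | [], _ :: _, _ => false
  | _ :: _, [], _ => false
  | a :: as, b :: bs, d =>
    if a ≠ b then false
    else
      if (pvRunSplit a as).1 + 1 ≠ (pvRunSplit a bs).1 + 1 then
        (if d + 1 > 1 then false else pvMergeB (pvRunSplit a as).2 (pvRunSplit a bs).2 (d + 1))
      else pvMergeB (pvRunSplit a as).2 (pvRunSplit a bs).2 d
termination_by s _ _ => s.length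
decreasing_by
  all_goals
    simp only [List.length_cons]
    exact Nat.lt_succ_of_le (pvRunSplit_len _ _)

def is_hp_diff_alt (baseseq_0 : String) (baseseq_1 : String) : Bool :=
  if baseseq_0.toList.length = baseseq_1.toList.length then false
  else pvMergeB baseseq_0.toList baseseq_1.toList 0

-- ===== PRECONDITION & SPEC =====
def Spec_is_hp_diff (baseseq_0 : String) (baseseq_1 : String) (out : Bool) : Prop := out = is_hp_diff_alt baseseq_0 baseseq_1
instance (baseseq_0 : String) (baseseq_1 : String) (out : Bool) : Decidable (Spec_is_hp_diff baseseq_0 baseseq_1 out) := by unfold Spec_is_hp_diff; infer_instance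

-- ===== CLAIM (what is proved, stated in full; the proofs are below) =====
def Claim_equal_is_hp_diff : Prop := ∀ (baseseq_0 : String) (baseseq_1 : String), Dom_is_hp_diff baseseq_0 baseseq_1 → Spec_is_hp_diff baseseq_0 baseseq_1 (is_hp_diff baseseq_0 baseseq_1)

-- ===== LEMMAS AND PROOFS =====

-- the run decomposition of a string, as a recursive function (proof-side normal form)
def pvRuns : List Char → List (Char × Nat)
  | [] => []
  | c :: cs => (c, (pvRunSplit c cs).1 + 1) :: pvRuns (pvRunSplit c cs).2
termination_by s => s.length
decreasing_by
  simp only [List.length_cons]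
  exact Nat.lt_succ_of_le (pvRunSplit_len _ _)

theorem pvRunSplit_cons_self (c : Char) (xs : List Char) :
    pvRunSplit c (c :: xs) = ((pvRunSplit c xs).1 + 1, (pvRunSplit c xs).2) := by
  simp [pvRunSplit]

theorem pvRunSplit_cons_ne {x c : Char} (h : ¬ x = c) (xs : List Char) :
    pvRunSplit c (x :: xs) = (0, x :: xs) := by
  simp [pvRunSplit, h]

theorem pvUpdateLast_append (c : Char) (n : Nat) :
    ∀ l : List (Char × Nat), pvUpdateLast (l ++ [(c, n)]) = l ++ [(c, n + 1)]
  | [] => rfl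
  | x :: xs => by
    rw [List.cons_append, List.cons_append]
    cases h : xs ++ [(c, n)] with
    | nil => exact absurd h (by simp)
    | cons y ys =>
      rw [pvUpdateLast, ← h, pvUpdateLast_append c n xs]

theorem pvFoldA (c : Char) (n : Nat) (acc : List (Char × Nat)) :
    ∀ s : List Char, (s.foldl pvHpStep (acc ++ [(c, n)], some c)).1
      = acc ++ (c, n + (pvRunSplit c s).1) :: pvRuns (pvRunSplit c s).2
  | [] => by simp [pvRunSplit, pvRuns]
  | x :: xs => by
    rw [List.foldl_cons]
    by_cases hx : x = c
    · subst hx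
      have hstep : pvHpStep (acc ++ [(x, n)], some x) x
          = (acc ++ [(x, n + 1)], some x) := by
        simp [pvHpStep, pvUpdateLast_append]
      rw [hstep, pvFoldA x (n + 1) acc xs, pvRunSplit_cons_self]
      have : n + ((pvRunSplit x xs).1 + 1) = n + 1 + (pvRunSplit x xs).1 := by omega
      simp only [this]
    · have hstep : pvHpStep (acc ++ [(c, n)], some c) x
          = ((acc ++ [(c, n)]) ++ [(x, 1)], some x) := by
        simp [pvHpStep, hx, List.append_assoc]
      rw [hstep, pvFoldA x 1 (acc ++ [(c, n)]) xs, pvRunSplit_cons_ne hx, pvRuns]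
      simp only [List.append_assoc, List.cons_append, List.nil_append]
      have : 1 + (pvRunSplit x xs).1 = (pvRunSplit x xs).1 + 1 := by omega
      simp [this]

theorem pvCompress_eq_runs : ∀ s : List Char, pvCompress s = pvRuns s
  | [] => by simp [pvCompress, pvRuns]
  | a :: as => by
    have hstep : pvHpStep ([], none) a = ([] ++ [(a, 1)], some a) := by
      simp [pvHpStep]
    rw [pvCompress, List.foldl_cons, hstep, pvFoldA a 1 [] as, pvRuns]
    have : 1 + (pvRunSplit a as).1 = (pvRunSplit a as).1 + 1 := by omega
    simp [this]

theorem pvMerge_eq : ∀ (k : Nat) (s t : List Char) (d : Nat), s.length ≤ k →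
    pvMergeB s t d
      = (if (pvRuns s).length = (pvRuns t).length then pvCheckA (pvRuns s) (pvRuns t) d
         else false) := by
  intro k
  induction k with
  | zero =>
    intro s t d hs
    have hs0 : s = [] := List.length_eq_zero_iff.mp (Nat.le_zero.mp hs)
    subst hs0
    cases t with
    | nil => simp [pvRuns, pvCheckA, pvMergeB]
    | cons b bs => simp [pvRuns, pvMergeB]
  | succ k ih =>
    intro s t d hs
    cases s with
    | nil =>
      cases t with
      | nil => simp [pvRuns, pvCheckA, pvMergeB]
      | cons b bs => simp [pvRuns, pvMergeB]
    | cons a as =>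
      cases t with
      | nil => simp [pvRuns, pvMergeB]
      | cons b bs =>
        by_cases hab : a = b
        · subst hab
          have has : (pvRunSplit a as).2.length ≤ k := by
            have := pvRunSplit_len a as
            simp only [List.length_cons] at hs
            omega
          have ihs : ∀ d' : Nat, pvMergeB (pvRunSplit a as).2 (pvRunSplit a bs).2 d'
              = (if (pvRuns (pvRunSplit a as).2).length = (pvRuns (pvRunSplit a bs).2).length
                 then pvCheckA (pvRuns (pvRunSplit a as).2) (pvRuns (pvRunSplit a bs).2) d'
                 else false) :=
            fun d' => ih _ _ d' has
          rw [pvMergeB, pvRuns, pvRuns, if_neg (show ¬ a ≠ a by simp), pvCheckA]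
          rw [ihs d, ihs (d + 1)]
          simp only [List.length_cons, Nat.add_right_cancel_iff, ne_eq]
          split_ifs <;> first | rfl | omega | simp_all
        · rw [pvMergeB, if_pos (show a ≠ b from hab), pvRuns, pvRuns, pvCheckA]
          rw [if_pos (show (a, (pvRunSplit a as).1 + 1).1 ≠ (b, (pvRunSplit b bs).1 + 1).1 from hab)]
          split_ifs <;> rfl

-- ===== VERDICT (by name: the statement is the Claim_ definition above) =====
theorem is_hp_diff_spec : Claim_equal_is_hp_diff := by
  intro b0 b1 _
  unfold Spec_is_hp_diff is_hp_diff is_hp_diff_alt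
  by_cases hlen : b0.toList.length = b1.toList.length
  · rw [if_pos hlen, if_pos hlen]
  · rw [if_neg hlen, if_neg hlen]
    simp only [pvCompress_eq_runs]
    rw [pvMerge_eq b0.toList.length b0.toList b1.toList 0 (le_refl _)]
    by_cases hr : (pvRuns b0.toList).length = (pvRuns b1.toList).length
    · rw [if_neg (not_not_intro hr), if_pos hr]
    · rw [if_pos hr, if_neg hr]
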